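-- pv_equiv track=rewrite | github.com/MalayAgarwal-Lee/Project-Euler-Problems | Circular primes.py | generateCircularPermutations
-- ===== SOURCE A (Python) =====
-- from functools import reduce
--
-- def generateCircularPermutations(l):
--
--     number = 1
--     circularPerms = []
--     circularPerms.append(l)
--     length = len(l)
--     l2 = l.copy()
--     while number < length:
--         for i in range(0, length - 1):
--             l2[i], l2[i + 1] = l2[i + 1], l2[i]
--
--         circularPerms.append(l2)
--         number += 1
--         l2 = l2.copy()
--
--     return list(map(lambda per: reduce(lambda x, y: int(x) * 10 + int(y), per), circularPerms))
-- ===== SOURCE B (Python) =====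
-- def generateCircularPermutations(l):
--     n = len(l)
--     p = 10 ** (n - 1)
--     v = 0
--     for d in l:
--         v = v * 10 + d
--     out = [v]
--     for k in range(n - 1):
--         d = l[k]
--         v = (v - d * p) * 10 + d
--         out.append(v)
--     return out
-- ===== Notes on version B (the rewrite author's own statement) =====
-- stated objective: faster
-- what changed: Instead of materialising every rotation by n adjacent-swap passes and re-folding each list into a number, B folds the list into its value once and then derives each successive rotation's value in O(1) arithmetic steps via v' = (v - l[k]*10^(n-1))*10 + l[k].
import Mathlib
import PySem

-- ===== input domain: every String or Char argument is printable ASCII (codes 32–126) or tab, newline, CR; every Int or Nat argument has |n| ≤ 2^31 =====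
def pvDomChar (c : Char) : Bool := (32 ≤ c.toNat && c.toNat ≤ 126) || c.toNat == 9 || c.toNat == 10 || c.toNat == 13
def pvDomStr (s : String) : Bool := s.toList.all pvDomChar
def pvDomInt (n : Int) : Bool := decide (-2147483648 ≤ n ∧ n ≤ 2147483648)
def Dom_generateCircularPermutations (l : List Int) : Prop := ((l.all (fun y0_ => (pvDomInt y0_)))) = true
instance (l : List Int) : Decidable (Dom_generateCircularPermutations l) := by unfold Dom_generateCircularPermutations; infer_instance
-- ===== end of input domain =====

-- B replaces A's quadratic build-all-rotations-then-refold with one Horner fold and an O(1) update per rotation.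
-- ===== PORT A =====
-- one adjacent swap l2[i], l2[i+1] = l2[i+1], l2[i]
def pvSwapAdj (xs : List Int) (i : Nat) : List Int :=
  (xs.set i (xs.getD (i + 1) 0)).set (i + 1) (xs.getD i 0)

-- the inner 'for i in range(0, length - 1)' pass
def pvPass (xs : List Int) : List Int :=
  (List.range (xs.length - 1)).foldl pvSwapAdj xs

-- the 'while number < length' loop; fuel = length - number
def pvLoopA : Nat → List Int → List (List Int) → List (List Int)
  | 0, _, acc => acc
  | k + 1, l2, acc =>
      let l2' := pvPass l2
      pvLoopA k l2' (acc ++ [l2'])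

-- reduce(lambda x, y: int(x)*10 + int(y), per); raises on [] (excluded by Pre_)
def pvReduceHorner (per : List Int) : Int :=
  match per with
  | [] => 0
  | h :: t => t.foldl (fun x y => x * 10 + y) h

def generateCircularPermutations (l : List Int) : List Int :=
  (pvLoopA (l.length - 1) l [l]).map pvReduceHorner

-- ===== PORT B =====
def generateCircularPermutations_alt (l : List Int) : List Int :=
  let n := l.length
  let p : Int := 10 ^ (n - 1)
  let v := l.foldl (fun v d => v * 10 + d) 0
  ((List.range (n - 1)).foldl
    (fun (s : List Int × Int) k =>
      let d := l.getD k 0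
      let v' := (s.2 - d * p) * 10 + d
      (s.1 ++ [v'], v'))
    ([v], v)).1

-- ===== PRECONDITION & SPEC =====
-- Pre_ excludes only the empty list, on which A's reduce() raises TypeError.
def Pre_generateCircularPermutations (l : List Int) : Prop := l ≠ []
instance (l : List Int) : Decidable (Pre_generateCircularPermutations l) := by
  unfold Pre_generateCircularPermutations; infer_instance

def pvWitness_generateCircularPermutations : List Int := ([1, 2, 3] : List Int)

def Spec_generateCircularPermutations (l : List Int) (out : List Int) : Prop := out = generateCircularPermutations_alt l
instance (l : List Int) (out : List Int) : Decidable (Spec_generateCircularPermutations l out) := by unfold Spec_generateCircularPermutations; infer_instance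

-- ===== CLAIM (what is proved, stated in full; the proofs are below) =====
def Claim_equal_generateCircularPermutations : Prop := ∀ (l : List Int), Dom_generateCircularPermutations l → Pre_generateCircularPermutations l → Spec_generateCircularPermutations l (generateCircularPermutations l)

-- ===== LEMMAS AND PROOFS =====

-- rotate-left-by-one, and its k-fold iterate
def pvRotl : List Int → List Int
  | [] => []
  | a :: t => t ++ [a]

def pvRot : Nat → List Int → List Int
  | 0, l => l
  | k + 1, l => pvRot k (pvRotl l)

def pvHorner (l : List Int) : Int := l.foldl (fun v d => v * 10 + d) 0

theorem pvSwapAdj_at (pre : List Int) (a b t' : _) :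
    pvSwapAdj (pre ++ a :: b :: t') pre.length = pre ++ b :: a :: t' := by
  induction pre with
  | nil => simp [pvSwapAdj]
  | cons p pre ih =>
      simp only [pvSwapAdj, List.cons_append, List.length_cons, List.getD] at *
      simp [List.set]

theorem pvPass_aux (t : List Int) : ∀ (pre : List Int) (a : Int),
    (List.range' pre.length t.length).foldl pvSwapAdj (pre ++ a :: t) = pre ++ t ++ [a] := by
  induction t with
  | nil => intro pre a; simp
  | cons b t' ih =>
      intro pre a
      rw [List.length_cons, List.range'_succ, List.foldl_cons, pvSwapAdj_at]
      have := ih (pre ++ [b]) a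
      simpa using this

theorem pvPass_eq_rotl (l : List Int) : pvPass l = pvRotl l := by
  cases l with
  | nil => rfl
  | cons a t =>
      have h := pvPass_aux t [] a
      simpa [pvPass, pvRotl, List.range_eq_range'] using h

theorem pvLoopA_eq (k : Nat) : ∀ (l2 : List Int) (acc : List (List Int)),
    pvLoopA k l2 acc = acc ++ (List.range k).map (fun j => pvRot (j + 1) l2) := by
  induction k with
  | zero => intro l2 acc; simp [pvLoopA]
  | succ k ih =>
      intro l2 acc
      simp only [pvLoopA, pvPass_eq_rotl]
      rw [ih]
      rw [List.range_succ_eq_map]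
      simp [pvRot, List.map_map, Function.comp]

theorem pvRot_length (k : Nat) : ∀ l : List Int, (pvRot k l).length = l.length := by
  induction k with
  | zero => intro l; rfl
  | succ k ih =>
      intro l
      cases l with
      | nil => simp [pvRot, pvRotl, ih]
      | cons a t => simp [pvRot, pvRotl, ih]

theorem pvRot_eq_drop_take (l : List Int) : ∀ k, k ≤ l.length →
    pvRot k l = l.drop k ++ l.take k := by
  intro k
  induction k with
  | zero => intro _; simp [pvRot]
  | succ k ih =>
      intro hk
      have hk' : k < l.length := Nat.lt_of_succ_le hk
      -- pvRot (k+1) l = pvRotl (pvRot k l)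
      have step : ∀ m l', pvRot (m + 1) l' = pvRotl (pvRot m l') := by
        intro m
        induction m with
        | zero => intro l'; rfl
        | succ m ihm => intro l'; simp only [pvRot]; exact ihm (pvRotl l')
      rw [step, ih (Nat.le_of_lt hk')]
      have hdrop : l.drop k = l[k] :: l.drop (k + 1) := by
        rw [List.drop_eq_getElem_cons hk']
      rw [hdrop, List.cons_append]
      simp only [pvRotl]
      rw [List.take_add_one, List.getElem?_eq_getElem hk', List.append_assoc]
      rfl

theorem pvHorner_init (l : List Int) : ∀ v : Int,
    l.foldl (fun v d => v * 10 + d) v = v * 10 ^ l.length + pvHorner l := by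
  induction l with
  | nil => intro v; simp [pvHorner]
  | cons a t ih =>
      intro v
      simp only [List.foldl_cons, pvHorner, List.length_cons] at *
      rw [ih (v * 10 + a), ih (0 * 10 + a)]
      ring

theorem pvHorner_append_singleton (t : List Int) (a : Int) :
    pvHorner (t ++ [a]) = pvHorner t * 10 + a := by
  simp [pvHorner]

theorem pvReduceHorner_eq (l : List Int) (h : l ≠ []) : pvReduceHorner l = pvHorner l := by
  cases l with
  | nil => exact absurd rfl h
  | cons a t =>
      simp [pvReduceHorner, pvHorner]

theorem pvRot_step_value (l : List Int) (k : Nat) (hk : k < l.length) :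
    pvHorner (pvRot (k + 1) l) =
      (pvHorner (pvRot k l) - l.getD k 0 * 10 ^ (l.length - 1)) * 10 + l.getD k 0 := by
  have hr : pvRot k l = l.drop k ++ l.take k := pvRot_eq_drop_take l k (Nat.le_of_lt hk)
  have hdrop : l.drop k = l[k] :: l.drop (k + 1) := List.drop_eq_getElem_cons hk
  have hr1 : pvRot (k + 1) l = l.drop (k + 1) ++ l.take (k + 1) := pvRot_eq_drop_take l (k + 1) hk
  have htake : l.take (k + 1) = l.take k ++ [l[k]] := by
    rw [List.take_add_one, List.getElem?_eq_getElem hk]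
    rfl
  have hgetD : l.getD k 0 = l[k] := by
    simp [List.getD, List.getElem?_eq_getElem hk]
  have hlen : (l.drop (k + 1) ++ l.take k).length = l.length - 1 := by
    simp
    omega
  rw [hr, hr1, hdrop, hgetD, htake, ← List.append_assoc, pvHorner_append_singleton,
    List.cons_append]
  have hcons : pvHorner (l[k] :: (l.drop (k + 1) ++ l.take k)) =
      l[k] * 10 ^ (l.length - 1) + pvHorner (l.drop (k + 1) ++ l.take k) := by
    have h := pvHorner_init (l.drop (k + 1) ++ l.take k) (0 * 10 + l[k])
    simp only [pvHorner, List.foldl_cons, hlen] at h ⊢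
    rw [h]
    ring
  rw [hcons]
  ring

theorem pvB_loop_inv (l : List Int) (hl : l ≠ []) (m : Nat) (hm : m ≤ l.length - 1) :
    (List.range m).foldl
      (fun (s : List Int × Int) k =>
        (s.1 ++ [(s.2 - l.getD k 0 * 10 ^ (l.length - 1)) * 10 + l.getD k 0],
         (s.2 - l.getD k 0 * 10 ^ (l.length - 1)) * 10 + l.getD k 0))
      ([pvHorner l], pvHorner l)
    = ([pvHorner l] ++ (List.range m).map (fun j => pvHorner (pvRot (j + 1) l)),
       pvHorner (pvRot m l)) := by
  induction m with
  | zero => simp [pvRot]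
  | succ m ih =>
      have hm' : m ≤ l.length - 1 := Nat.le_of_succ_le hm
      have hml : m < l.length := by
        have : 0 < l.length := List.length_pos_of_ne_nil hl
        omega
      rw [List.range_succ, List.foldl_append, ih hm']
      simp [pvRot_step_value l m hml]

theorem pvHorner_rot_mem_ne_nil (l : List Int) (hl : l ≠ []) (j : Nat) :
    pvRot j l ≠ [] := by
  intro h
  have := pvRot_length j l
  rw [h] at this
  exact hl (List.eq_nil_of_length_eq_zero this.symm)

-- ===== VERDICT (by name: the statement is the Claim_ definition above) =====
theorem generateCircularPermutations_spec : Claim_equal_generateCircularPermutations := by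
  intro l _ hpre
  unfold Spec_generateCircularPermutations generateCircularPermutations generateCircularPermutations_alt
  dsimp only
  have hv : l.foldl (fun v d => v * 10 + d) 0 = pvHorner l := rfl
  rw [hv, pvB_loop_inv l hpre (l.length - 1) (le_refl _)]
  rw [pvLoopA_eq]
  simp only [List.map_append, List.map_map, List.map_cons, List.map_nil]
  congr 1
  · simp [pvReduceHorner_eq l hpre]
  · apply List.map_congr_left
    intro j hj
    exact pvReduceHorner_eq _ (pvHorner_rot_mem_ne_nil l hpre (j + 1))
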